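-- pv_equiv track=rewrite | github.com/gatersbolton/AutoFinance | standardize/feedback/template.py | infer_source_type
-- ===== SOURCE A (Python) =====
-- from typing import Dict, Iterable, List, Sequence
--
-- def infer_source_type(reason_codes: Iterable[str]) -> str:
--     reasons = list(reason_codes)
--     if any(str(reason).startswith("conflict:") for reason in reasons):
--         return "conflict"
--     if any(str(reason).startswith("mapping:") for reason in reasons):
--         return "unmapped"
--     if any(str(reason).startswith("validation:") for reason in reasons):
--         return "validation"
--     if any("suspicious" in str(reason) for reason in reasons):
--         return "suspicious"
--     if any(str(reason).startswith("unplaced:") for reason in reasons):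
--         return "unplaced"
--     if any(str(reason).startswith("source:") for reason in reasons):
--         return "fallback"
--     return "review"
-- ===== SOURCE B (Python) =====
-- def infer_source_type(reason_codes):
--     conflict = mapping = validation = suspicious = unplaced = source = False
--     for reason in reason_codes:
--         s = str(reason)
--         conflict = conflict or s.startswith("conflict:")
--         mapping = mapping or s.startswith("mapping:")
--         validation = validation or s.startswith("validation:")
--         suspicious = suspicious or ("suspicious" in s)
--         unplaced = unplaced or s.startswith("unplaced:")
--         source = source or s.startswith("source:")
--     if conflict:
--         return "conflict"
--     if mapping:
--         return "unmapped"
--     if validation: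
--         return "validation"
--     if suspicious:
--         return "suspicious"
--     if unplaced:
--         return "unplaced"
--     if source:
--         return "fallback"
--     return "review"
-- ===== Notes on version B (the rewrite author's own statement) =====
-- stated objective: alternative
-- what changed: Replaces six separate any() passes over the list with one pass that accumulates six boolean flags, then decides in the same priority order.
import Mathlib
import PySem

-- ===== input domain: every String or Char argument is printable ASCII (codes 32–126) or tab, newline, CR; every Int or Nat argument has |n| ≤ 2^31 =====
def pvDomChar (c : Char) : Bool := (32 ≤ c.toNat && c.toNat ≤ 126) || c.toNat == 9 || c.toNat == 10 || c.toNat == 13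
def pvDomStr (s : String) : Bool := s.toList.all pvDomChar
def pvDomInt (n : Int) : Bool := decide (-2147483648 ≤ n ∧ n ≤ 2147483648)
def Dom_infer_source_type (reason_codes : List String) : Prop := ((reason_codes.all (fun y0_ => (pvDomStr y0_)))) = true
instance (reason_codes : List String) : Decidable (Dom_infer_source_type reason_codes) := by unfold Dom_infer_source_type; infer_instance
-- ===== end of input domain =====

-- B replaces A's six separate any() passes by one pass accumulating six boolean flags,
-- then decides in the same priority order (objective: alternative decomposition).

-- ===== PORT A =====
def infer_source_type (reason_codes : List String) : String :=
  let reasons := reason_codes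
  if reasons.any (fun reason => PySem.Str.startswith reason "conflict:") then "conflict"
  else if reasons.any (fun reason => PySem.Str.startswith reason "mapping:") then "unmapped"
  else if reasons.any (fun reason => PySem.Str.startswith reason "validation:") then "validation"
  else if reasons.any (fun reason => PySem.Str.isIn "suspicious" reason) then "suspicious"
  else if reasons.any (fun reason => PySem.Str.startswith reason "unplaced:") then "unplaced"
  else if reasons.any (fun reason => PySem.Str.startswith reason "source:") then "fallback"
  else "review"

-- ===== PORT B =====
-- single pass: fold the six flags over the list, then decide by priority
def inferFlagsStep (acc : Bool × Bool × Bool × Bool × Bool × Bool) (s : String) :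
    Bool × Bool × Bool × Bool × Bool × Bool :=
  (acc.1 || PySem.Str.startswith s "conflict:",
   acc.2.1 || PySem.Str.startswith s "mapping:",
   acc.2.2.1 || PySem.Str.startswith s "validation:",
   acc.2.2.2.1 || PySem.Str.isIn "suspicious" s,
   acc.2.2.2.2.1 || PySem.Str.startswith s "unplaced:",
   acc.2.2.2.2.2 || PySem.Str.startswith s "source:")

def infer_source_type_alt (reason_codes : List String) : String :=
  let flags := reason_codes.foldl inferFlagsStep (false, false, false, false, false, false)
  if flags.1 then "conflict"
  else if flags.2.1 then "unmapped"
  else if flags.2.2.1 then "validation"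
  else if flags.2.2.2.1 then "suspicious"
  else if flags.2.2.2.2.1 then "unplaced"
  else if flags.2.2.2.2.2 then "fallback"
  else "review"

-- ===== PRECONDITION & SPEC =====
def Spec_infer_source_type (reason_codes : List String) (out : String) : Prop := out = infer_source_type_alt reason_codes
instance (reason_codes : List String) (out : String) : Decidable (Spec_infer_source_type reason_codes out) := by unfold Spec_infer_source_type; infer_instance

-- ===== CLAIM (what is proved, stated in full; the proofs are below) =====
def Claim_equal_infer_source_type : Prop := ∀ (reason_codes : List String), Dom_infer_source_type reason_codes → Spec_infer_source_type reason_codes (infer_source_type reason_codes)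

-- ===== LEMMAS AND PROOFS =====

-- the folded flags are exactly the six 'any' results, each or-ed onto the initial accumulator
theorem foldl_flags (xs : List String) (a : Bool × Bool × Bool × Bool × Bool × Bool) :
    xs.foldl inferFlagsStep a =
      (a.1 || xs.any (fun s => PySem.Str.startswith s "conflict:"),
       a.2.1 || xs.any (fun s => PySem.Str.startswith s "mapping:"),
       a.2.2.1 || xs.any (fun s => PySem.Str.startswith s "validation:"),
       a.2.2.2.1 || xs.any (fun s => PySem.Str.isIn "suspicious" s),
       a.2.2.2.2.1 || xs.any (fun s => PySem.Str.startswith s "unplaced:"),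
       a.2.2.2.2.2 || xs.any (fun s => PySem.Str.startswith s "source:")) := by
  induction xs generalizing a with
  | nil => simp
  | cons x xs ih =>
    simp [List.foldl_cons, ih, inferFlagsStep, Bool.or_assoc]

-- ===== VERDICT (by name: the statement is the Claim_ definition above) =====
theorem infer_source_type_spec : Claim_equal_infer_source_type := by
  intro xs _
  unfold Spec_infer_source_type infer_source_type infer_source_type_alt
  simp [foldl_flags]
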